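-- pv_equiv track=rewrite | github.com/darora9/ai-voice-agent-1 | agent/conversation.py | _nearby_slots
-- ===== SOURCE A (Python) =====
-- def _nearby_slots(requested: str, available: list) -> tuple[str | None, str | None]:
--     """Return (slot_before, slot_after) closest to requested time from available list."""
--     if not available:
--         return None, None
--     before = None
--     after = None
--     for s in sorted(available):
--         if s < requested:
--             before = s
--         elif s > requested and after is None:
--             after = s
--     return before, after
-- ===== SOURCE B (Python) =====
-- def _nearby_slots(requested: str, available: list) -> tuple[str | None, str | None]:
--     """Return (slot_before, slot_after) closest to requested time from available list."""
--     before = None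
--     after = None
--     for s in available:
--         if s < requested:
--             if before is None or before < s:
--                 before = s
--         elif s > requested:
--             if after is None or s < after:
--                 after = s
--     return before, after
-- ===== Notes on version B (the rewrite author's own statement) =====
-- stated objective: faster
-- what changed: Replaced sort-then-scan (sorted(available) plus a full pass) by a single linear pass that tracks the maximum slot below and the minimum slot above the requested time.
import Mathlib
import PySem

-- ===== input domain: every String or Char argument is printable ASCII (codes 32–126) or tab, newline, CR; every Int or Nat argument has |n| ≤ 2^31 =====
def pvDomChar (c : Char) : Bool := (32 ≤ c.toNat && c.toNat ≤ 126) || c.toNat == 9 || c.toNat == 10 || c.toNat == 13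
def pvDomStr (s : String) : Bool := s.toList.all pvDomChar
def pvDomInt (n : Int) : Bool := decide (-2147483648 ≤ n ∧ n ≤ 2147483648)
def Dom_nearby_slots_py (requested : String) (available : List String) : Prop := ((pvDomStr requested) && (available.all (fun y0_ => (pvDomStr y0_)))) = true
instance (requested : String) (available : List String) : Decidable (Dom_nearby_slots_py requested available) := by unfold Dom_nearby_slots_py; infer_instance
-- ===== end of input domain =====

-- B replaces A's sort-then-scan by a single linear pass tracking the max slot below
-- and the min slot above the requested time (objective: faster, O(n log n) -> O(n)).


-- ===== PORT A =====
def nearby_slots_py (requested : String) (available : List String) : Option String × Option String :=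
  if available = [] then (none, none)
  else
    (PySem.List.sorted available (fun x => x) false).foldl
      (fun (st : Option String × Option String) s =>
        if s < requested then (some s, st.2)
        else if requested < s ∧ st.2 = none then (st.1, some s)
        else st)
      (none, none)

-- ===== PORT B =====
def nearby_slots_py_alt (requested : String) (available : List String) : Option String × Option String :=
  available.foldl
    (fun (st : Option String × Option String) s =>
      if s < requested then
        (match st.1 with
         | none => some s
         | some b => if b < s then some s else some b, st.2)
      else if requested < s then
        (st.1,
         match st.2 with
         | none => some s
         | some a => if s < a then some s else some a)
      else st)
    (none, none)

-- ===== PRECONDITION & SPEC =====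
def Spec_nearby_slots_py (requested : String) (available : List String) (out : Option String × Option String) : Prop := out = nearby_slots_py_alt requested available
instance (requested : String) (available : List String) (out : Option String × Option String) : Decidable (Spec_nearby_slots_py requested available out) := by unfold Spec_nearby_slots_py; infer_instance

-- ===== CLAIM (what is proved, stated in full; the proofs are below) =====
def Claim_equal_nearby_slots_py : Prop := ∀ (requested : String) (available : List String), Dom_nearby_slots_py requested available → Spec_nearby_slots_py requested available (nearby_slots_py requested available)

-- ===== LEMMAS AND PROOFS =====

-- option-valued max / min accumulators (the step functions of B, without the filter)
def obMax (b : Option String) (s : String) : Option String :=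
  some (match b with | none => s | some x => max x s)

def obMin (a : Option String) (s : String) : Option String :=
  some (match a with | none => s | some x => min x s)

-- A's step functions for the two independent components
def aBefore (r : String) (b : Option String) (s : String) : Option String :=
  if s < r then some s else b

def aAfter (r : String) (a : Option String) (s : String) : Option String :=
  if r < s then (if a = none then some s else a) else a

theorem foldl_ext_fn {α β : Type} (f g : β → α → β) (h : ∀ b a, f b a = g b a)
    (l : List α) (b : β) : l.foldl f b = l.foldl g b := by
  induction l generalizing b with
  | nil => rfl
  | cons x t ih => rw [List.foldl_cons, List.foldl_cons, h, ih]

theorem obMax_rcomm : ∀ (z : Option String) (x y : String), obMax (obMax z x) y = obMax (obMax z y) x := by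
  intro z x y
  cases z <;> simp [obMax, max_comm, max_left_comm]

theorem obMin_rcomm : ∀ (z : Option String) (x y : String), obMin (obMin z x) y = obMin (obMin z y) x := by
  intro z x y
  cases z <;> simp [obMin, min_comm, min_left_comm]

-- B's if-branches are exactly obMax / obMin
theorem if_lt_eq_obMax (b : Option String) (s : String) :
    (match b with | none => some s | some x => if x < s then some s else some x) = obMax b s := by
  cases b with
  | none => rfl
  | some x =>
    rcases lt_or_ge x s with h | h
    · simp [obMax, h, max_eq_right h.le]
    · simp [obMax, not_lt.2 h, max_eq_left h]

theorem if_lt_eq_obMin (a : Option String) (s : String) :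
    (match a with | none => some s | some x => if s < x then some s else some x) = obMin a s := by
  cases a with
  | none => rfl
  | some x =>
    rcases lt_or_ge s x with h | h
    · simp [obMin, h, min_eq_right h.le]
    · simp [obMin, not_lt.2 h, min_eq_left h]

-- split a pair-fold with componentwise step into two folds
theorem foldl_pair_split (f : Option String → String → Option String)
    (g : Option String → String → Option String) (l : List String)
    (b a : Option String) :
    l.foldl (fun st s => (f st.1 s, g st.2 s)) (b, a) = (l.foldl f b, l.foldl g a) := by
  induction l generalizing b a with
  | nil => rfl
  | cons x t ih => simp [List.foldl_cons, ih]

-- B's step is the componentwise pair of filtered obMax / obMin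
theorem alt_step_eq (r : String) (st : Option String × Option String) (s : String) :
    (if s < r then
        (match st.1 with | none => some s | some b => if b < s then some s else some b, st.2)
      else if r < s then
        (st.1, match st.2 with | none => some s | some a => if s < a then some s else some a)
      else st)
    = ((if s < r then obMax st.1 s else st.1), (if r < s then obMin st.2 s else st.2)) := by
  by_cases h1 : s < r
  · have h2 : ¬ r < s := asymm h1
    rw [if_pos h1, if_pos h1, if_neg h2, if_lt_eq_obMax]
  · by_cases h2 : r < s
    · rw [if_neg h1, if_neg h1, if_pos h2, if_pos h2, if_lt_eq_obMin]
    · rw [if_neg h1, if_neg h1, if_neg h2, if_neg h2]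

-- A's step is the componentwise pair of aBefore / aAfter
theorem a_step_eq (r : String) (st : Option String × Option String) (s : String) :
    (if s < r then (some s, st.2)
      else if r < s ∧ st.2 = none then (st.1, some s)
      else st)
    = (aBefore r st.1 s, aAfter r st.2 s) := by
  by_cases h1 : s < r
  · have h2 : ¬ r < s := asymm h1
    simp [h1, h2, aBefore, aAfter]
  · by_cases h2 : r < s
    · by_cases h3 : st.2 = none <;> simp [h1, h2, h3, aBefore, aAfter]
    · simp [h1, h2, aBefore, aAfter]

-- aBefore from `none` over a ≤-sorted list computes its last element
theorem foldl_aBefore_filter (r : String) (l : List String) :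
    l.foldl (aBefore r) none = (l.filter (fun s => s < r)).foldl (fun _ s => some s) none := by
  have : l.foldl (aBefore r) none
      = l.foldl (fun b s => if (fun s => decide (s < r)) s then (fun (_ : Option String) s => some s) b s else b) none := by
    apply foldl_ext_fn
    intro b s; simp [aBefore]
  rw [this, ← List.foldl_filter]

theorem foldl_lastwins (l : List String) (b : Option String) :
    l.foldl (fun (_ : Option String) s => some s) b
      = (match l.getLast? with | some x => some x | none => b) := by
  induction l generalizing b with
  | nil => rfl
  | cons x t ih =>
    rw [List.foldl_cons, ih]
    cases t with
    | nil => rfl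
    | cons y t' =>
      cases hz : (y :: t').getLast? with
      | none => simp at hz
      | some z => rw [List.getLast?_cons_cons, hz]

-- obMax from `some a`, when a is ≤ everything in l and l is sorted, yields l's last (or a)
theorem foldl_obMax_sorted_some (l : List String) (hl : l.Pairwise (· ≤ ·)) (a : String)
    (ha : ∀ x ∈ l, a ≤ x) :
    l.foldl obMax (some a) = (match l.getLast? with | some x => some x | none => some a) := by
  induction l generalizing a with
  | nil => rfl
  | cons x t ih =>
    have hax : a ≤ x := ha x (List.mem_cons_self ..)
    rw [List.foldl_cons]
    have : obMax (some a) x = some x := by simp [obMax, max_eq_right hax]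
    rw [this, ih (List.Pairwise.of_cons hl) x (fun y hy => (List.pairwise_cons.mp hl).1 y hy)]
    cases t with
    | nil => rfl
    | cons y t' =>
      cases hz : (y :: t').getLast? with
      | none => simp at hz
      | some z => rw [List.getLast?_cons_cons, hz]

theorem foldl_obMax_sorted (l : List String) (hl : l.Pairwise (· ≤ ·)) :
    l.foldl obMax none = (match l.getLast? with | some x => some x | none => none) := by
  cases l with
  | nil => rfl
  | cons x t =>
    rw [List.foldl_cons]
    have : obMax none x = some x := rfl
    rw [this, foldl_obMax_sorted_some t (List.Pairwise.of_cons hl) x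
      (fun y hy => (List.pairwise_cons.mp hl).1 y hy)]
    cases t with
    | nil => rfl
    | cons y t' =>
      cases hz : (y :: t').getLast? with
      | none => simp at hz
      | some z => rw [List.getLast?_cons_cons, hz]

-- aAfter from `none` computes the head of the filtered list
theorem foldl_aAfter_filter (r : String) (l : List String) :
    l.foldl (aAfter r) none
      = (l.filter (fun s => r < s)).foldl (fun a s => if a = none then some s else a) none := by
  have : l.foldl (aAfter r) none
      = l.foldl (fun a s => if (fun s => decide (r < s)) s then (fun (a : Option String) s => if a = none then some s else a) a s else a) none := by
    apply foldl_ext_fn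
    intro a s; simp [aAfter]
  rw [this, ← List.foldl_filter]

theorem foldl_firstwins_some (l : List String) (x : String) :
    l.foldl (fun (a : Option String) s => if a = none then some s else a) (some x) = some x := by
  induction l with
  | nil => rfl
  | cons y t ih => simp [List.foldl_cons, ih]

theorem foldl_firstwins (l : List String) :
    l.foldl (fun (a : Option String) s => if a = none then some s else a) none = l.head? := by
  cases l with
  | nil => rfl
  | cons x t => simp [List.foldl_cons, foldl_firstwins_some]

theorem foldl_obMin_sorted_some (l : List String) (a : String) (ha : ∀ x ∈ l, a ≤ x) :
    l.foldl obMin (some a) = some a := by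
  induction l with
  | nil => rfl
  | cons x t ih =>
    have hax : a ≤ x := ha x (List.mem_cons_self ..)
    rw [List.foldl_cons]
    have : obMin (some a) x = some a := by simp [obMin, min_eq_left hax]
    rw [this, ih (fun y hy => ha y (List.mem_cons_of_mem _ hy))]

theorem foldl_obMin_sorted (l : List String) (hl : l.Pairwise (· ≤ ·)) :
    l.foldl obMin none = l.head? := by
  cases l with
  | nil => rfl
  | cons x t =>
    rw [List.foldl_cons]
    have : obMin none x = some x := rfl
    rw [this, foldl_obMin_sorted_some t x (fun y hy => (List.pairwise_cons.mp hl).1 y hy)]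
    rfl

-- B's two components, as filtered folds
theorem alt_eq_folds (r : String) (l : List String) :
    nearby_slots_py_alt r l
      = ((l.filter (fun s => s < r)).foldl obMax none,
         (l.filter (fun s => r < s)).foldl obMin none) := by
  unfold nearby_slots_py_alt
  have h : l.foldl
      (fun (st : Option String × Option String) s =>
        if s < r then
          (match st.1 with | none => some s | some b => if b < s then some s else some b, st.2)
        else if r < s then
          (st.1, match st.2 with | none => some s | some a => if s < a then some s else some a)
        else st)
      (none, none)
      = l.foldl (fun (st : Option String × Option String) s =>
          ((if s < r then obMax st.1 s else st.1), (if r < s then obMin st.2 s else st.2)))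
          (none, none) := by
    apply foldl_ext_fn
    intro st s; exact alt_step_eq r st s
  rw [h, foldl_pair_split (fun b s => if s < r then obMax b s else b)
        (fun a s => if r < s then obMin a s else a)]
  refine congrArg₂ Prod.mk ?_ ?_
  · have : l.foldl (fun b s => if s < r then obMax b s else b) none
        = l.foldl (fun b s => if (fun s => decide (s < r)) s then obMax b s else b) none := by
      apply foldl_ext_fn
      intro b s; simp
    rw [this, ← List.foldl_filter]
  · have : l.foldl (fun a s => if r < s then obMin a s else a) none
        = l.foldl (fun a s => if (fun s => decide (r < s)) s then obMin a s else a) none := by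
      apply foldl_ext_fn
      intro a s; simp
    rw [this, ← List.foldl_filter]

-- A's two components over the sorted list
theorem a_eq_folds (r : String) (l : List String) (hne : l ≠ []) :
    nearby_slots_py r l
      = (((PySem.List.sorted l (fun x => x) false).filter (fun s => s < r)).foldl (fun _ s => some s) none,
         ((PySem.List.sorted l (fun x => x) false).filter (fun s => r < s)).foldl
           (fun a s => if a = none then some s else a) none) := by
  unfold nearby_slots_py
  rw [if_neg hne]
  have h : (PySem.List.sorted l (fun x => x) false).foldl
      (fun (st : Option String × Option String) s =>
        if s < r then (some s, st.2)
        else if r < s ∧ st.2 = none then (st.1, some s)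
        else st)
      (none, none)
      = (PySem.List.sorted l (fun x => x) false).foldl
          (fun (st : Option String × Option String) s => (aBefore r st.1 s, aAfter r st.2 s))
          (none, none) := by
    apply foldl_ext_fn
    intro st s; exact a_step_eq r st s
  rw [h, foldl_pair_split (aBefore r) (aAfter r)]
  exact congrArg₂ Prod.mk (foldl_aBefore_filter r _) (foldl_aAfter_filter r _)

theorem sorted_filter_pairwise (l : List String) (p : String → Bool) :
    ((PySem.List.sorted l (fun x => x) false).filter p).Pairwise (· ≤ ·) := by
  exact List.Pairwise.filter p (PySem.List.sorted_pairwise l (fun x => x))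

-- ===== VERDICT (by name: the statement is the Claim_ definition above) =====
theorem nearby_slots_py_spec : Claim_equal_nearby_slots_py := by
  intro r l _
  unfold Spec_nearby_slots_py
  rcases eq_or_ne l [] with rfl | hne
  · rfl
  · rw [a_eq_folds r l hne, alt_eq_folds r l]
    have hperm : (PySem.List.sorted l (fun x => x) false).Perm l :=
      PySem.List.sorted_perm l (fun x => x) false
    have hpermB := hperm.filter (fun s => decide (s < r))
    have hpermA := hperm.filter (fun s => decide (r < s))
    refine congrArg₂ Prod.mk ?_ ?_
    · -- before component
      rw [foldl_lastwins, ← foldl_obMax_sorted _ (sorted_filter_pairwise l _)]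
      haveI : RightCommutative obMax := ⟨obMax_rcomm⟩
      exact hpermB.foldl_eq none
    · -- after component
      rw [foldl_firstwins, ← foldl_obMin_sorted _ (sorted_filter_pairwise l _)]
      haveI : RightCommutative obMin := ⟨obMin_rcomm⟩
      exact hpermA.foldl_eq none
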